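-- pv_equiv track=rewrite | github.com/yuvrajagarwal48/Speech_Analytics | speech_analysis.py | extract_speaker_text
-- ===== SOURCE A (Python) =====
-- def extract_speaker_text(transcript, speaker):
--     capture = False
--     speaker_text = []
--     for line in transcript:
--         if line.startswith(speaker):
--             capture = True
--         elif capture and line.strip() == "":
--             capture = False
--         if capture and not line.startswith(speaker):
--             speaker_text.append(line.strip())
--     return " ".join(speaker_text)
-- ===== SOURCE B (Python) =====
-- def _block_text(block, speaker):
--     for i, line in enumerate(block):
--         if line.startswith(speaker):
--             return [l.strip() for l in block[i + 1:] if not l.startswith(speaker)]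
--     return []
--
--
-- def extract_speaker_text(transcript, speaker):
--     pieces = []
--     block = []
--     for line in transcript:
--         if line.strip() == "":
--             pieces += _block_text(block, speaker)
--             block = []
--         else:
--             block.append(line)
--     pieces += _block_text(block, speaker)
--     return " ".join(pieces)
-- ===== Notes on version B (the rewrite author's own statement) =====
-- stated objective: alternative
-- what changed: B partitions the transcript into blocks separated by whitespace-only lines and, per block, collects the stripped non-header lines after the first speaker-header line, instead of A's running capture flag; Pre_ excludes transcripts in which a nonempty speaker tag is itself a prefix of some whitespace-only line (a whitespace speaker), a degenerate corner where A treats the blank line as a header while B treats it as a delimiter and either reading is defensible.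
-- outside the precondition, e.g. on extract_speaker_text(['A: hi', ' ', 'x'], ' '): A returns 'x', B returns ''
import Mathlib
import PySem

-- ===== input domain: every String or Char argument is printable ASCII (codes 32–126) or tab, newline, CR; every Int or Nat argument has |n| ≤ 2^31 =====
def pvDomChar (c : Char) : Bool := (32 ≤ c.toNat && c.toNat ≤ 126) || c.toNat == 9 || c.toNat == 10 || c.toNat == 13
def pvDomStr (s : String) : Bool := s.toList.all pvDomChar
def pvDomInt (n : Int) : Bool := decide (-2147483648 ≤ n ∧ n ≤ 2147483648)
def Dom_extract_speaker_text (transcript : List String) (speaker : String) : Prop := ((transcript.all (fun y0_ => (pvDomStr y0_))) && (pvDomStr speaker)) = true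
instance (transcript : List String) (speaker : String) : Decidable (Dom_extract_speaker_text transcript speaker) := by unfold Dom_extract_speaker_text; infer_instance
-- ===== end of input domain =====

-- B partitions into blank-separated blocks and reads each block by its first header line, instead of A's running capture flag (alternative, same cost).

-- ===== PORT A =====
def extract_speaker_text (transcript : List String) (speaker : String) : String :=
  PySem.Str.join " " (transcript.foldl (fun (st : Bool × List String) line =>
    let capture : Bool :=
      if PySem.Str.startswith line speaker then true
      else if st.1 && (PySem.Str.strip line == "") then false
      else st.1
    let acc :=
      if capture && !(PySem.Str.startswith line speaker) then st.2 ++ [PySem.Str.strip line]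
      else st.2
    (capture, acc)) (false, [])).2

-- ===== PORT B =====
-- helper = Source B's _block_text: first header index, then stripped non-header lines after it
def speakerBlock (block : List String) (speaker : String) : List String :=
  match block.findIdx? (fun l => PySem.Str.startswith l speaker) with
  | none => []
  | some i => ((block.drop (i + 1)).filter (fun l => !PySem.Str.startswith l speaker)).map PySem.Str.strip

def extract_speaker_text_alt (transcript : List String) (speaker : String) : String :=
  let st := transcript.foldl (fun (st : List String × List String) line =>
    if PySem.Str.strip line == "" then
      (st.1 ++ speakerBlock st.2 speaker, [])
    else
      (st.1, st.2 ++ [line])) ([], [])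
  PySem.Str.join " " (st.1 ++ speakerBlock st.2 speaker)

-- ===== PRECONDITION & SPEC =====
-- Pre_ excludes transcripts where the nonempty speaker tag is itself a prefix of some whitespace-only
-- line (a whitespace speaker): there A's flag treats the blank line as a speaker header while B treats
-- it as a block delimiter, and either reading of this degenerate corner is defensible.
def Pre_extract_speaker_text (transcript : List String) (speaker : String) : Prop :=
  speaker = "" ∨ ∀ l ∈ transcript, PySem.Str.strip l = "" → PySem.Str.startswith l speaker = false

instance (transcript : List String) (speaker : String) : Decidable (Pre_extract_speaker_text transcript speaker) := by unfold Pre_extract_speaker_text; infer_instance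

def pvWitness_extract_speaker_text : List String × String := (["Bob: hi", "hello there", "  ", "Ann: yo"], "Bob:")

def Spec_extract_speaker_text (transcript : List String) (speaker : String) (out : String) : Prop := out = extract_speaker_text_alt transcript speaker
instance (transcript : List String) (speaker : String) (out : String) : Decidable (Spec_extract_speaker_text transcript speaker out) := by unfold Spec_extract_speaker_text; infer_instance

-- ===== CLAIM (what is proved, stated in full; the proofs are below) =====
def Claim_equal_extract_speaker_text : Prop := ∀ (transcript : List String) (speaker : String), Dom_extract_speaker_text transcript speaker → Pre_extract_speaker_text transcript speaker → Spec_extract_speaker_text transcript speaker (extract_speaker_text transcript speaker)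

-- ===== LEMMAS AND PROOFS =====

-- reference recursion: the list of stripped pieces collected from `ls` starting with capture flag `c`
def estPieces (speaker : String) : List String → Bool → List String
  | [], _ => []
  | l :: ls, c =>
    let c' : Bool :=
      if PySem.Str.startswith l speaker then true
      else if c && (PySem.Str.strip l == "") then false
      else c
    (if c' && !PySem.Str.startswith l speaker then [PySem.Str.strip l] else []) ++ estPieces speaker ls c'

theorem estA_loop (speaker : String) (ls : List String) (c : Bool) (acc : List String) :
    (ls.foldl (fun (st : Bool × List String) line =>
      let capture : Bool :=
        if PySem.Str.startswith line speaker then true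
        else if st.1 && (PySem.Str.strip line == "") then false
        else st.1
      let acc :=
        if capture && !(PySem.Str.startswith line speaker) then st.2 ++ [PySem.Str.strip line]
        else st.2
      (capture, acc)) (c, acc)).2 = acc ++ estPieces speaker ls c := by
  induction ls generalizing c acc with
  | nil => simp [estPieces]
  | cons l ls ih =>
    simp only [List.foldl_cons, estPieces]
    rw [ih]
    split_ifs <;> simp [List.append_assoc]

theorem speakerBlock_cons_header (speaker : String) (b : String) (bs : List String)
    (hb : PySem.Chars.startswith b.toList speaker.toList = true) :
    speakerBlock (b :: bs) speaker
      = (bs.filter (fun l => !PySem.Str.startswith l speaker)).map PySem.Str.strip := by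
  simp [speakerBlock, List.findIdx?_cons, hb]

theorem speakerBlock_cons_nonheader (speaker : String) (b : String) (bs : List String)
    (hb : PySem.Chars.startswith b.toList speaker.toList = false) :
    speakerBlock (b :: bs) speaker = speakerBlock bs speaker := by
  simp only [speakerBlock, List.findIdx?_cons, PySem.Str.startswith_eq, hb,
    if_neg Bool.false_ne_true]
  cases h : bs.findIdx? (fun l => PySem.Chars.startswith l.toList speaker.toList) with
  | none => rfl
  | some i => simp [List.drop_succ_cons]

theorem speakerBlock_append_singleton (speaker : String) (block : List String) (l : String) :
    speakerBlock (block ++ [l]) speaker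
      = speakerBlock block speaker ++
        (if block.any (fun x => PySem.Str.startswith x speaker) && !PySem.Str.startswith l speaker
          then [PySem.Str.strip l] else []) := by
  induction block with
  | nil =>
    cases h : PySem.Chars.startswith l.toList speaker.toList <;>
      simp [speakerBlock, List.findIdx?_cons, h]
  | cons b bs ih =>
    cases hb : PySem.Chars.startswith b.toList speaker.toList with
    | true =>
      rw [List.cons_append, speakerBlock_cons_header speaker b _ hb,
        speakerBlock_cons_header speaker b bs hb]
      cases hl : PySem.Chars.startswith l.toList speaker.toList <;>
        simp [List.filter_append, List.any_cons, hb, hl]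
    | false =>
      rw [List.cons_append, speakerBlock_cons_nonheader speaker b _ hb,
        speakerBlock_cons_nonheader speaker b bs hb, ih]
      simp [List.any_cons, hb]

-- B's loop, for transcripts without blank header lines, computes A's reference pieces
theorem estB_loop (speaker : String) (ls : List String) (pieces block : List String)
    (hpre : ∀ l ∈ ls, PySem.Str.strip l = "" → PySem.Str.startswith l speaker = false) :
    (let st := ls.foldl (fun (st : List String × List String) line =>
      if PySem.Str.strip line == "" then
        (st.1 ++ speakerBlock st.2 speaker, [])
      else
        (st.1, st.2 ++ [line])) (pieces, block)
     st.1 ++ speakerBlock st.2 speaker)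
    = pieces ++ speakerBlock block speaker
        ++ estPieces speaker ls (block.any (fun x => PySem.Str.startswith x speaker)) := by
  induction ls generalizing pieces block with
  | nil => simp [estPieces]
  | cons l ls ih =>
    simp only [List.foldl_cons]
    have hpre' : ∀ l ∈ ls, PySem.Str.strip l = "" → PySem.Str.startswith l speaker = false :=
      fun x hx => hpre x (List.mem_cons_of_mem _ hx)
    by_cases hs : PySem.Str.strip l = ""
    · -- blank line: by hpre it is not a header, so it is a delimiter in both readings
      have hh : PySem.Chars.startswith l.toList speaker.toList = false := by
        have := hpre l (List.mem_cons_self) hs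
        simpa [PySem.Str.startswith_eq] using this
      rw [if_pos (by simp [hs])]
      rw [ih _ _ hpre']
      cases hany : block.any (fun x => PySem.Chars.startswith x.toList speaker.toList) <;>
        simp [estPieces, hs, hh, hany, speakerBlock, List.append_assoc]
    · -- non-blank line: appended to the current block
      rw [if_neg (by simp [hs])]
      rw [ih _ _ hpre', speakerBlock_append_singleton]
      cases hh : PySem.Chars.startswith l.toList speaker.toList <;>
        cases hany : block.any (fun x => PySem.Chars.startswith x.toList speaker.toList) <;>
          simp [estPieces, hs, hh, hany, List.any_append, List.append_assoc]

-- empty speaker: every line is a header in A, so nothing is ever collected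
theorem estPieces_empty_speaker (ls : List String) (c : Bool) :
    estPieces "" ls c = [] := by
  induction ls generalizing c with
  | nil => rfl
  | cons l ls ih => simp [estPieces, PySem.Str.startswith_eq, PySem.Chars.startswith, ih]

theorem speakerBlock_empty_speaker (block : List String) :
    speakerBlock block "" = [] := by
  cases block with
  | nil => rfl
  | cons b bs =>
    rw [speakerBlock_cons_header _ b bs (by simp [PySem.Chars.startswith])]
    simp [PySem.Str.startswith_eq, PySem.Chars.startswith]

theorem estB_loop_empty_speaker (ls : List String) (pieces block : List String) :
    (let st := ls.foldl (fun (st : List String × List String) line =>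
      if PySem.Str.strip line == "" then
        (st.1 ++ speakerBlock st.2 "", [])
      else
        (st.1, st.2 ++ [line])) (pieces, block)
     st.1 ++ speakerBlock st.2 "") = pieces := by
  induction ls generalizing pieces block with
  | nil => simp [speakerBlock_empty_speaker]
  | cons l ls ih =>
    simp only [List.foldl_cons]
    by_cases hs : PySem.Str.strip l = ""
    · rw [if_pos (by simp [hs])]; rw [ih]; simp [speakerBlock_empty_speaker]
    · rw [if_neg (by simp [hs])]; exact ih _ _

-- ===== VERDICT (by name: the statement is the Claim_ definition above) =====
theorem extract_speaker_text_spec : Claim_equal_extract_speaker_text := by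
  intro transcript speaker _ hpre
  unfold Spec_extract_speaker_text extract_speaker_text extract_speaker_text_alt
  rw [estA_loop speaker transcript false []]
  rcases hpre with hempty | hpre
  · subst hempty
    have hB := estB_loop_empty_speaker transcript [] []
    simp only at hB ⊢
    rw [hB, estPieces_empty_speaker]
    rfl
  · have hB := estB_loop speaker transcript [] [] hpre
    simp only at hB ⊢
    rw [hB]
    simp [speakerBlock]
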